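-- pv_equiv track=rewrite | github.com/openLuat/LuatOS | mcp/mcp_server.py | _find_module_case_insensitive
-- ===== SOURCE A (Python) =====
-- from typing import Dict, List, Optional, Tuple, Any
--
-- def _find_module_case_insensitive(module_name: str, demos_by_module: Dict[str, List[Dict]]) -> Optional[str]:
--     """Find module name case-insensitively, return the original case name.
--
--     Supports multi-module directories separated by underscores.
--     Example: 'Air780EHM_Air780EHV_Air780EGH' matches 'Air780EHM', 'Air780EHV', or 'Air780EGH'.
--     """
--     if not module_name:
--         return None
--     module_lower = module_name.strip().lower()
--
--     for key in demos_by_module.keys():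
--         key_lower = key.lower()
--         # Direct match
--         if key_lower == module_lower:
--             return key
--         # Multi-module directory (separated by underscores)
--         if '_' in key:
--             sub_modules = key_lower.split('_')
--             if module_lower in sub_modules:
--                 return key
--
--     return None
-- ===== SOURCE B (Python) =====
-- def _find_module_case_insensitive(module_name, demos_by_module):
--     if not module_name:
--         return None
--     module_lower = module_name.strip().lower()
--     index = {}
--     for key in demos_by_module.keys():
--         key_lower = key.lower()
--         index.setdefault(key_lower, key)
--         if '_' in key:
--             for name in key_lower.split('_'):
--                 index.setdefault(name, key)
--     return index.get(module_lower)
-- ===== Notes on version B (the rewrite author's own statement) =====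
-- stated objective: alternative
-- what changed: Replaces A's short-circuiting scan with branching per key by a build-then-lookup shape: one pass builds a dict index from every normalized name (lowered key and its underscore parts) to the first key registering it via setdefault, then a single index.get(module_lower) lookup.
import Mathlib
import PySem

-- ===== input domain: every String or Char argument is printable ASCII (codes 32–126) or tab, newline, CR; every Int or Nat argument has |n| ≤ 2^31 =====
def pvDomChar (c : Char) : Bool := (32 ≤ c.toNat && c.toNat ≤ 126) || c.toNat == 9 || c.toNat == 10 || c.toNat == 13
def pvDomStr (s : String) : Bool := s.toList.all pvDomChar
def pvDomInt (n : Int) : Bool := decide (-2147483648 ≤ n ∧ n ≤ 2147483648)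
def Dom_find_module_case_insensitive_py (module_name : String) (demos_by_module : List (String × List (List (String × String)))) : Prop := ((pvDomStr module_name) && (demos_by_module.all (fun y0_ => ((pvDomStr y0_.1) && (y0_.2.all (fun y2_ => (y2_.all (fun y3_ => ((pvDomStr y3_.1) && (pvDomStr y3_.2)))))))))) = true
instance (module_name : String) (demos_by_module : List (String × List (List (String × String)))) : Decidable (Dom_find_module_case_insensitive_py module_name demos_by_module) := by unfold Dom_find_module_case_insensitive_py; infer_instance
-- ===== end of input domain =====

-- B replaces A's short-circuiting per-key scan by building a name→first-key index dict once (setdefault keeps the first registering key) and doing a single lookup — an alternative decomposition, same cost.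
-- ===== PORT A =====
-- s.split('_'): exact via PySem.Chars.splitOn (separator is non-empty, so Python never raises)
def pvSplitUnderscore (s : String) : List String :=
  (PySem.Chars.splitOn s.toList ['_']).map String.ofList

-- A's loop over dict keys: return first key whose lower equals ml, or whose underscore parts contain ml
def pvLoopA (ml : String) : List (String × List (List (String × String))) → Option String
  | [] => none
  | (key, _) :: rest =>
    let key_lower := PySem.Str.lower key
    if key_lower = ml then some key
    else if PySem.Str.isIn "_" key then
      if ml ∈ pvSplitUnderscore key_lower then some key else pvLoopA ml rest
    else pvLoopA ml rest

def find_module_case_insensitive_py (module_name : String) (demos_by_module : List (String × List (List (String × String)))) : Option String :=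
  if module_name = "" then none
  else pvLoopA (PySem.Str.lower (PySem.Str.strip module_name)) demos_by_module

-- ===== PORT B =====
-- B: build the name → first-registering-key index (setdefault keeps the first), then one lookup
def pvBuildIndex (demos : List (String × List (List (String × String)))) : PySem.Dict String String :=
  demos.foldl (fun d kv =>
    let key := kv.1
    let key_lower := PySem.Str.lower key
    let d := d.setdefault key_lower key
    if PySem.Str.isIn "_" key then
      (pvSplitUnderscore key_lower).foldl (fun d name => d.setdefault name key) d
    else d) PySem.Dict.empty

def find_module_case_insensitive_py_alt (module_name : String) (demos_by_module : List (String × List (List (String × String)))) : Option String :=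
  if module_name = "" then none
  else (pvBuildIndex demos_by_module).get? (PySem.Str.lower (PySem.Str.strip module_name))

-- ===== PRECONDITION & SPEC =====
def Spec_find_module_case_insensitive_py (module_name : String) (demos_by_module : List (String × List (List (String × String)))) (out : Option String) : Prop := out = find_module_case_insensitive_py_alt module_name demos_by_module
instance (module_name : String) (demos_by_module : List (String × List (List (String × String)))) (out : Option String) : Decidable (Spec_find_module_case_insensitive_py module_name demos_by_module out) := by unfold Spec_find_module_case_insensitive_py; infer_instance

-- ===== CLAIM (what is proved, stated in full; the proofs are below) =====
def Claim_equal_find_module_case_insensitive_py : Prop := ∀ (module_name : String) (demos_by_module : List (String × List (List (String × String)))), Dom_find_module_case_insensitive_py module_name demos_by_module → Spec_find_module_case_insensitive_py module_name demos_by_module (find_module_case_insensitive_py module_name demos_by_module)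

-- ===== LEMMAS AND PROOFS =====

theorem pv_get?_setdefault {d : PySem.Dict String String} {n v m : String} :
    (d.setdefault n v).get? m = (d.get? m).or (if m = n then some v else none) := by
  by_cases hc : d.contains n = true
  · rw [PySem.Dict.setdefault_of_contains d v hc]
    by_cases hm : m = n
    · subst hm
      rw [PySem.Dict.contains_eq_isSome_get?] at hc
      cases h : d.get? m with
      | none => rw [h] at hc; simp at hc
      | some w => simp
    · simp [hm]
  · rw [PySem.Dict.setdefault_of_not_contains d v (by simpa using hc)]
    rw [PySem.Dict.get?_insert d n m v]
    by_cases hm : m = n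
    · subst hm
      have : d.get? m = none := by
        rw [PySem.Dict.contains_eq_isSome_get?] at hc
        cases h : d.get? m with
        | none => rfl
        | some w => rw [h] at hc; simp at hc
      simp [this]
    · simp [hm]

theorem pv_get?_fold_setdefault (names : List String) (key : String)
    (d : PySem.Dict String String) (m : String) :
    ((names.foldl (fun d name => d.setdefault name key) d).get? m)
      = (d.get? m).or (if m ∈ names then some key else none) := by
  induction names generalizing d with
  | nil => simp
  | cons n ns ih =>
    simp only [List.foldl_cons, ih, pv_get?_setdefault, List.mem_cons, Option.or_assoc]
    by_cases h1 : m = n <;> by_cases h2 : m ∈ ns <;> simp [h1, h2]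

theorem pv_build_step (d : PySem.Dict String String)
    (kv : String × List (List (String × String))) (ml : String) :
    ((fun (d : PySem.Dict String String) (kv : String × List (List (String × String))) =>
        let key := kv.1
        let key_lower := PySem.Str.lower key
        let d := d.setdefault key_lower key
        if PySem.Str.isIn "_" key then
          (pvSplitUnderscore key_lower).foldl (fun d name => d.setdefault name key) d
        else d) d kv).get? ml
      = (d.get? ml).or (pvLoopA ml [kv]) := by
  obtain ⟨key, v⟩ := kv
  simp only [pvLoopA]
  by_cases hu : PySem.Str.isIn "_" key = true
  · simp only [hu, if_true]
    rw [pv_get?_fold_setdefault, pv_get?_setdefault, Option.or_assoc]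
    by_cases h1 : PySem.Str.lower key = ml
    · simp [h1]
    · have h1' : ¬ ml = PySem.Str.lower key := fun h => h1 h.symm
      by_cases h2 : ml ∈ pvSplitUnderscore (PySem.Str.lower key) <;>
        simp [h1, h1', h2]
  · simp only [hu, if_false, Bool.false_eq_true]
    rw [pv_get?_setdefault]
    by_cases h1 : PySem.Str.lower key = ml
    · simp [h1]
    · have h1' : ¬ ml = PySem.Str.lower key := fun h => h1 h.symm
      simp [h1, h1']

theorem pv_build_get? (demos : List (String × List (List (String × String))))
    (d : PySem.Dict String String) (ml : String) :
    ((demos.foldl (fun d kv =>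
        let key := kv.1
        let key_lower := PySem.Str.lower key
        let d := d.setdefault key_lower key
        if PySem.Str.isIn "_" key then
          (pvSplitUnderscore key_lower).foldl (fun d name => d.setdefault name key) d
        else d) d).get? ml)
      = (d.get? ml).or (pvLoopA ml demos) := by
  induction demos generalizing d with
  | nil => simp [pvLoopA]
  | cons kv rest ih =>
    rw [List.foldl_cons, ih]
    rw [pv_build_step d kv ml]
    rw [Option.or_assoc]
    congr 1
    obtain ⟨key, v⟩ := kv
    simp only [pvLoopA]
    by_cases h1 : PySem.Str.lower key = ml
    · simp [h1]
    · by_cases hu : PySem.Chars.isIn ['_'] key.toList = true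
      · by_cases h2 : ml ∈ pvSplitUnderscore (PySem.Str.lower key) <;>
          simp [h1, hu, h2]
      · simp [h1, hu]

-- ===== VERDICT (by name: the statement is the Claim_ definition above) =====
theorem find_module_case_insensitive_py_spec : Claim_equal_find_module_case_insensitive_py := by
  intro module_name demos _
  unfold Spec_find_module_case_insensitive_py
  unfold find_module_case_insensitive_py find_module_case_insensitive_py_alt
  by_cases h0 : module_name = ""
  · simp [h0]
  · simp only [h0, if_false]
    unfold pvBuildIndex
    rw [pv_build_get?]
    simp
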